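-- pv_equiv track=rewrite | github.com/PapaKoftes/Layla | agent/services/tool_loop_detection.py | _pingpong_tail
-- ===== SOURCE A (Python) =====
-- def _pingpong_tail(history: list[tuple[str, str]], min_len: int = 6) -> bool:
--     if len(history) < min_len:
--         return False
--     tail = history[-min_len:]
--     tools = [t for t, _ in tail]
--     if len(set(tools)) != 2:
--         return False
--     a, b = tools[0], tools[1]
--     if a == b:
--         return False
--     for i, t in enumerate(tools):
--         if i % 2 == 0 and t != a:
--             return False
--         if i % 2 == 1 and t != b:
--             return False
--     sigs = [s for _, s in tail]
--     if len(set(sigs[0::2])) > 1 or len(set(sigs[1::2])) > 1: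
--         return False
--     return True
-- ===== SOURCE B (Python) =====
-- def _pingpong_tail(history: list[tuple[str, str]], min_len: int = 6) -> bool:
--     if len(history) < min_len:
--         return False
--     tail = history[-min_len:]
--     if len(tail) < 2 or tail[0][0] == tail[1][0]:
--         return False
--     return all(tail[i] == tail[i % 2] for i in range(len(tail)))
-- ===== Notes on version B (the rewrite author's own statement) =====
-- stated objective: simpler
-- what changed: Replaces A's five-stage pipeline (build tools list, count distinct tools with a set, check alternation by index parity against tools[0]/tools[1], then two set-uniqueness checks on strided sig slices) with a single period-2 check on the full tuples: tail[0][0] != tail[1][0] plus all(tail[i] == tail[i % 2]), building no intermediate lists or sets.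
import Mathlib
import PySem

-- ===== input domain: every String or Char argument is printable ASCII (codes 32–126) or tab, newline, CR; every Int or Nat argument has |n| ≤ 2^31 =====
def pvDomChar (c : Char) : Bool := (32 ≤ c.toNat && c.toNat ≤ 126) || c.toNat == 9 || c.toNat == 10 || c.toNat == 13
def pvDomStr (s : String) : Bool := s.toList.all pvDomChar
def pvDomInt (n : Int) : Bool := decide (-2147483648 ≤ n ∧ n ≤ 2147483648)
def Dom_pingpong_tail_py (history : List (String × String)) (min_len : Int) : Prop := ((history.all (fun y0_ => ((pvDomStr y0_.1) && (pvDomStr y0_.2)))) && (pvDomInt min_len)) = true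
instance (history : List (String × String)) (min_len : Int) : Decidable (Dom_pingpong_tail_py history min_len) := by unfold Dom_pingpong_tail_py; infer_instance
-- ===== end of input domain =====

-- B replaces A's set-counting + parity loop + strided sig slices by one period-2 check on whole tuples (objective: simpler).

-- ===== PORT A =====
-- helper: the body of A after 'tail = history[-min_len:]' (transliterated step for step)
def pvAcore (tail : List (String × String)) : Bool :=
  let tools := tail.map (fun p => p.1)
  if PySem.Set.len (PySem.Set.ofList tools) ≠ 2 then false
  else
    let a := PySem.List.pyGetD tools 0 ""
    let b := PySem.List.pyGetD tools 1 ""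
    if a == b then false
    else if !((PySem.List.enumerate tools 0).all (fun p =>
        (!(PySem.Int.mod p.1 2 == 0 && p.2 != a)) && (!(PySem.Int.mod p.1 2 == 1 && p.2 != b)))) then
      false
    else
      let sigs := tail.map (fun p => p.2)
      let evens := (PySem.List.slice? sigs (some 0) none 2).getD []
      let odds := (PySem.List.slice? sigs (some 1) none 2).getD []
      if PySem.Set.len (PySem.Set.ofList evens) > 1 ∨ PySem.Set.len (PySem.Set.ofList odds) > 1 then
        false
      else true

def pingpong_tail_py (history : List (String × String)) (min_len : Int) : Bool :=
  if (history.length : Int) < min_len then false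
  else pvAcore (PySem.List.slice history (some (-min_len)) none)

-- ===== PORT B =====
-- helper: the body of B after 'tail = history[-min_len:]' (transliterated step for step)
def pvBcore (tail : List (String × String)) : Bool :=
  if tail.length < 2 then false
  else if (PySem.List.pyGetD tail 0 ("", "")).1 == (PySem.List.pyGetD tail 1 ("", "")).1 then false
  else (PySem.List.pyRange 0 (tail.length : Int) 1).all (fun i =>
    PySem.List.pyGetD tail i ("", "") == PySem.List.pyGetD tail (PySem.Int.mod i 2) ("", ""))

def pingpong_tail_py_alt (history : List (String × String)) (min_len : Int) : Bool :=
  if (history.length : Int) < min_len then false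
  else pvBcore (PySem.List.slice history (some (-min_len)) none)

-- ===== PRECONDITION & SPEC =====
def Spec_pingpong_tail_py (history : List (String × String)) (min_len : Int) (out : Bool) : Prop := out = pingpong_tail_py_alt history min_len
instance (history : List (String × String)) (min_len : Int) (out : Bool) : Decidable (Spec_pingpong_tail_py history min_len out) := by unfold Spec_pingpong_tail_py; infer_instance

-- ===== CLAIM (what is proved, stated in full; the proofs are below) =====
def Claim_equal_pingpong_tail_py : Prop := ∀ (history : List (String × String)) (min_len : Int), Dom_pingpong_tail_py history min_len → Spec_pingpong_tail_py history min_len (pingpong_tail_py history min_len)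

-- ===== LEMMAS AND PROOFS =====

-- a nodup list all of whose elements are equal has length ≤ 1
theorem pv_nodup_const_len_le_one {α : Type} (l : List α) (hn : l.Nodup)
    (h : ∀ u ∈ l, ∀ v ∈ l, u = v) : l.length ≤ 1 := by
  match l with
  | [] => simp
  | [u] => simp
  | u :: v :: w =>
    exfalso
    have := h u (by simp) v (by simp)
    simp [this] at hn

-- any two elements of a list of length ≤ 1 are equal
theorem pv_len_le_one_all_eq {α : Type} (l : List α) (h : l.length ≤ 1) :
    ∀ u ∈ l, ∀ v ∈ l, u = v := by
  match l with
  | [] => simp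
  | [w] => simp
  | a :: b :: c => simp at h

-- a nodup list whose membership is exactly {a, b} with a ≠ b has length 2
theorem pv_nodup_pair_len {α : Type} [DecidableEq α] (l : List α) (hn : l.Nodup)
    (a b : α) (hab : a ≠ b) (ha : a ∈ l) (hb : b ∈ l) (h : ∀ z ∈ l, z = a ∨ z = b) :
    l.length = 2 := by
  have hfin : l.toFinset = {a, b} := by
    ext z
    simp only [List.mem_toFinset, Finset.mem_insert, Finset.mem_singleton]
    constructor
    · exact h z
    · rintro (rfl | rfl) <;> assumption
  have := List.toFinset_card_of_nodup hn
  rw [hfin, Finset.card_pair hab] at this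
  omega

theorem pv_filterMap_range_eq_map {α : Type} (c : Nat) (f : Nat → Option α) (g : Nat → α)
    (h : ∀ k < c, f k = some (g k)) :
    (List.range c).filterMap f = (List.range c).map g := by
  induction c with
  | zero => simp
  | succ c ih =>
    rw [List.range_succ, List.filterMap_append, List.map_append,
      ih (fun k hk => h k (by omega))]
    simp [h c (by omega)]

-- sigs[0::2] as a map over even indices
theorem pv_slice2_zero {α : Type} (xs : List α) (d : α) :
    (PySem.List.slice? xs (some 0) none 2).getD [] =
      (List.range ((xs.length + 1) / 2)).map (fun k => xs.getD (2 * k) d) := by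
  simp only [PySem.List.slice?, PySem.List.sliceIndices]
  norm_num
  have hc : (if 0 < xs.length then (((xs.length : Int) + 2 - 1) / (2 : Int)).toNat else 0)
      = (xs.length + 1) / 2 := by split <;> omega
  rw [hc]
  apply pv_filterMap_range_eq_map
  intro k hk
  have h2k : 2 * k < xs.length := by omega
  have ht : ((2 : Int) * (k : Int)).toNat = 2 * k := by omega
  rw [ht, List.getElem?_eq_getElem h2k]
  simp

-- sigs[1::2] as a map over odd indices
theorem pv_slice2_one {α : Type} (xs : List α) (d : α) :
    (PySem.List.slice? xs (some 1) none 2).getD [] =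
      (List.range (xs.length / 2)).map (fun k => xs.getD (2 * k + 1) d) := by
  simp only [PySem.List.slice?, PySem.List.sliceIndices]
  norm_num
  have hc : (if 1 < xs.length then (((xs.length : Int) - min 1 (xs.length : Int) + 2 - 1) / (2 : Int)).toNat else 0)
      = xs.length / 2 := by split <;> omega
  rw [hc]
  apply pv_filterMap_range_eq_map
  intro k hk
  have h2k : 2 * k + 1 < xs.length := by omega
  have ht : (min 1 ((xs.length : Int)) + 2 * (k : Int)).toNat = 2 * k + 1 := by omega
  rw [ht, List.getElem?_eq_getElem h2k]
  simp


theorem pv_getD_map_fst (t : List (String × String)) (j : Nat) (hj : j < t.length) :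
    (t.map (fun p => p.1)).getD j "" = (t.getD j ("", "")).1 := by
  rw [List.getD_eq_getElem _ _ (by simpa using hj), List.getD_eq_getElem _ _ hj, List.getElem_map]

theorem pv_getD_map_snd (t : List (String × String)) (j : Nat) (hj : j < t.length) :
    (t.map (fun p => p.2)).getD j "" = (t.getD j ("", "")).2 := by
  rw [List.getD_eq_getElem _ _ (by simpa using hj), List.getD_eq_getElem _ _ hj, List.getElem_map]

theorem pv_mod_cast (i : Int) (h : 0 ≤ i) : PySem.Int.mod i 2 = ((i.toNat % 2 : Nat) : Int) := by
  simp [PySem.Int.mod, Int.fmod_eq_emod]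
  omega

-- B's core returns true exactly on period-2 tails with distinct leading tools
theorem pv_B_iff (x y : String × String) (rest : List (String × String)) :
    pvBcore (x :: y :: rest) = true ↔
      (x.1 ≠ y.1 ∧ ∀ j < (x :: y :: rest).length,
        (x :: y :: rest).getD j ("", "") = if j % 2 = 0 then x else y) := by
  have hn2 : 2 ≤ (x :: y :: rest).length := by simp
  unfold pvBcore
  rw [if_neg (by omega)]
  have h0 : PySem.List.pyGetD (x :: y :: rest) 0 ("", "") = x := by
    rw [PySem.List.pyGetD_ofNat']; rfl
  have h1 : PySem.List.pyGetD (x :: y :: rest) 1 ("", "") = y := by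
    rw [PySem.List.pyGetD_ofNat']; rfl
  rw [h0, h1]
  by_cases hxy : x.1 = y.1
  · simp [hxy]
  · rw [if_neg (by simpa using hxy), List.all_eq_true]
    constructor
    · intro hall
      refine ⟨hxy, ?_⟩
      intro j hj
      have hmem : (j : Int) ∈ PySem.List.pyRange 0 ((x :: y :: rest).length : Int) 1 := by
        rw [PySem.List.mem_pyRange_one]; omega
      have hpred := hall _ hmem
      rw [pv_mod_cast _ (by omega), PySem.List.pyGetD_natCast, PySem.List.pyGetD_natCast] at hpred
      have heq := eq_of_beq hpred
      simp only [Int.toNat_natCast] at heq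
      rcases Nat.mod_two_eq_zero_or_one j with h | h <;> rw [h] at heq <;> simp [h] <;> exact heq
    · rintro ⟨-, hP⟩ i hi
      rw [PySem.List.mem_pyRange_one] at hi
      have hji : i = ((i.toNat : Nat) : Int) := by omega
      rw [hji, pv_mod_cast _ (by omega), PySem.List.pyGetD_natCast, PySem.List.pyGetD_natCast,
        Int.toNat_natCast]
      have hlt : i.toNat < (x :: y :: rest).length := by omega
      have e1 := hP i.toNat hlt
      rcases Nat.mod_two_eq_zero_or_one i.toNat with h | h <;>
        rw [h] at e1 ⊢ <;> simp at e1 <;> simp [e1, List.getD]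


-- A's core returns true exactly on period-2 tails with distinct leading tools
theorem pv_A_iff (x y : String × String) (rest : List (String × String)) :
    pvAcore (x :: y :: rest) = true ↔
      (x.1 ≠ y.1 ∧ ∀ j < (x :: y :: rest).length,
        (x :: y :: rest).getD j ("", "") = if j % 2 = 0 then x else y) := by
  have ha : PySem.List.pyGetD ((x :: y :: rest).map (fun p => p.1)) 0 "" = x.1 := by
    rw [PySem.List.pyGetD_ofNat']; rfl
  have hb : PySem.List.pyGetD ((x :: y :: rest).map (fun p => p.1)) 1 "" = y.1 := by
    rw [PySem.List.pyGetD_ofNat']; rfl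
  have hev := pv_slice2_zero ((x :: y :: rest).map (fun p => p.2)) ""
  have hod := pv_slice2_one ((x :: y :: rest).map (fun p => p.2)) ""
  -- component characterisations under the period-2 hypothesis
  have hcomp : ∀ (hP : ∀ j < (x :: y :: rest).length,
        (x :: y :: rest).getD j ("", "") = if j % 2 = 0 then x else y),
      ∀ j (hj : j < (x :: y :: rest).length),
        ((x :: y :: rest).map (fun p => p.1)).getD j "" = (if j % 2 = 0 then x.1 else y.1) ∧
        ((x :: y :: rest).map (fun p => p.2)).getD j "" = (if j % 2 = 0 then x.2 else y.2) := by
    intro hP j hj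
    rw [pv_getD_map_fst _ _ hj, pv_getD_map_snd _ _ hj, hP j hj]
    split <;> exact ⟨rfl, rfl⟩
  simp only [pvAcore, ha, hb, PySem.Set.len, hev, hod]
  split_ifs with h1 h2 h3 h4
  · -- distinct-tool count ≠ 2 : RHS must fail
    simp only [false_iff]
    rintro ⟨hxy, hP⟩
    apply h1
    have : (PySem.Set.ofList ((x :: y :: rest).map (fun p => p.1))).length = 2 := by
      apply pv_nodup_pair_len _ (PySem.Set.nodup_ofList _) x.1 y.1 hxy
      · rw [PySem.Set.mem_ofList]; simp
      · rw [PySem.Set.mem_ofList]; simp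
      · intro z hz
        rw [PySem.Set.mem_ofList] at hz
        obtain ⟨j, hj, rfl⟩ := List.mem_iff_getElem.1 hz
        have hjt : j < (x :: y :: rest).length := by simpa using hj
        have := (hcomp hP j hjt).1
        rw [List.getD_eq_getElem _ _ hj] at this
        rw [this]; split
        · exact Or.inl rfl
        · exact Or.inr rfl
    rw [this]; norm_num
  · -- a == b : RHS must fail
    simp only [false_iff]
    rintro ⟨hxy, -⟩
    exact hxy (eq_of_beq h2)
  · -- alternation loop failed : RHS must fail
    simp only [false_iff]
    rintro ⟨hxy, hP⟩
    rw [Bool.not_eq_true', List.all_eq_false] at h3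
    obtain ⟨p, hp, hpred⟩ := h3
    apply hpred
    rw [PySem.List.mem_enumerate_iff] at hp
    obtain ⟨k, hk, rfl⟩ := hp
    have hkt : k < (x :: y :: rest).length := by simpa using hk
    have htk : ((x :: y :: rest).map (fun p => p.1))[k] = (if k % 2 = 0 then x.1 else y.1) := by
      have := (hcomp hP k hkt).1
      rwa [List.getD_eq_getElem _ _ hk] at this
    have hmod : PySem.Int.mod (0 + (k : Int)) 2 = ((k % 2 : Nat) : Int) := by
      rw [pv_mod_cast _ (by omega)]; congr 1; omega
    dsimp only
    rw [hmod, htk]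
    rcases Nat.mod_two_eq_zero_or_one k with h | h <;> rw [h] <;> simp
  · -- a sig slice has > 1 distinct values : RHS must fail
    simp only [false_iff]
    rintro ⟨hxy, hP⟩
    have hlen : ((x :: y :: rest).map (fun p => p.2)).length = (x :: y :: rest).length := by simp
    have hconst0 : ∀ u ∈ (List.range ((((x :: y :: rest).map (fun p => p.2)).length + 1) / 2)).map
        (fun k => ((x :: y :: rest).map (fun p => p.2)).getD (2 * k) ""), u = x.2 := by
      intro u hu
      obtain ⟨k, hk, rfl⟩ := List.mem_map.1 hu
      rw [List.mem_range] at hk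
      have hjt : 2 * k < (x :: y :: rest).length := by
        rw [hlen] at hk; simp at hk ⊢; omega
      have := (hcomp hP (2 * k) hjt).2
      rw [this]; simp [Nat.mul_mod_right]
    have hconst1 : ∀ u ∈ (List.range (((x :: y :: rest).map (fun p => p.2)).length / 2)).map
        (fun k => ((x :: y :: rest).map (fun p => p.2)).getD (2 * k + 1) ""), u = y.2 := by
      intro u hu
      obtain ⟨k, hk, rfl⟩ := List.mem_map.1 hu
      rw [List.mem_range] at hk
      have hjt : 2 * k + 1 < (x :: y :: rest).length := by
        rw [hlen] at hk; simp at hk ⊢; omega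
      have := (hcomp hP (2 * k + 1) hjt).2
      rw [this]
      have : (2 * k + 1) % 2 = 1 := by omega
      simp [this]
    rcases h4 with h4 | h4
    · have hle : (PySem.Set.ofList ((List.range ((((x :: y :: rest).map (fun p => p.2)).length + 1) / 2)).map
          (fun k => ((x :: y :: rest).map (fun p => p.2)).getD (2 * k) ""))).length ≤ 1 := by
        apply pv_nodup_const_len_le_one _ (PySem.Set.nodup_ofList _)
        intro u hu v hv
        rw [PySem.Set.mem_ofList] at hu hv
        rw [hconst0 u hu, hconst0 v hv]
      omega
    · have hle : (PySem.Set.ofList ((List.range (((x :: y :: rest).map (fun p => p.2)).length / 2)).map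
          (fun k => ((x :: y :: rest).map (fun p => p.2)).getD (2 * k + 1) ""))).length ≤ 1 := by
        apply pv_nodup_const_len_le_one _ (PySem.Set.nodup_ofList _)
        intro u hu v hv
        rw [PySem.Set.mem_ofList] at hu hv
        rw [hconst1 u hu, hconst1 v hv]
      omega
  · -- every check passed : RHS holds
    simp only [true_iff]
    push Not at h4
    obtain ⟨h4e, h4o⟩ := h4
    have hxy : x.1 ≠ y.1 := fun h => h2 (by simp [h])
    refine ⟨hxy, ?_⟩
    have hall := h3
    simp only [Bool.not_eq_true', Bool.not_eq_false] at hall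
    rw [List.all_eq_true] at hall
    have hEq := pv_len_le_one_all_eq _ (by omega :
      (PySem.Set.ofList ((List.range ((((x :: y :: rest).map (fun p => p.2)).length + 1) / 2)).map
        (fun k => ((x :: y :: rest).map (fun p => p.2)).getD (2 * k) ""))).length ≤ 1)
    have hOd := pv_len_le_one_all_eq _ (by omega :
      (PySem.Set.ofList ((List.range (((x :: y :: rest).map (fun p => p.2)).length / 2)).map
        (fun k => ((x :: y :: rest).map (fun p => p.2)).getD (2 * k + 1) ""))).length ≤ 1)
    intro j hj
    have hjT : j < ((x :: y :: rest).map (fun p => p.1)).length := by simpa using hj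
    have h3j := hall (0 + (j : Int), ((x :: y :: rest).map (fun p => p.1))[j])
      ((PySem.List.mem_enumerate_iff _ _ _).2 ⟨j, hjT, rfl⟩)
    have hmod : PySem.Int.mod (0 + (j : Int)) 2 = ((j % 2 : Nat) : Int) := by
      rw [pv_mod_cast _ (by omega)]; congr 1; omega
    rw [hmod] at h3j
    -- first component of tail[j]
    have hfst : ((x :: y :: rest).map (fun p => p.1)).getD j "" = (if j % 2 = 0 then x.1 else y.1) := by
      rw [List.getD_eq_getElem _ _ hjT]
      rcases Nat.mod_two_eq_zero_or_one j with h | h <;> simp [h] at h3j ⊢ <;> exact h3j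
    -- second component of tail[j]
    have hsnd : ((x :: y :: rest).map (fun p => p.2)).getD j "" = (if j % 2 = 0 then x.2 else y.2) := by
      have hm : ((x :: y :: rest).map (fun p => p.2)).length = (x :: y :: rest).length := by simp
      rcases Nat.mod_two_eq_zero_or_one j with h | h
      · have hj2 : j = 2 * (j / 2) := by omega
        have hmem : ((x :: y :: rest).map (fun p => p.2)).getD j "" ∈
            (List.range ((((x :: y :: rest).map (fun p => p.2)).length + 1) / 2)).map
              (fun k => ((x :: y :: rest).map (fun p => p.2)).getD (2 * k) "") := by
          refine List.mem_map.2 ⟨j / 2, List.mem_range.2 ?_, by rw [← hj2]⟩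
          rw [hm]; simp at hj ⊢; omega
        have hmem0 : ((x :: y :: rest).map (fun p => p.2)).getD 0 "" ∈
            (List.range ((((x :: y :: rest).map (fun p => p.2)).length + 1) / 2)).map
              (fun k => ((x :: y :: rest).map (fun p => p.2)).getD (2 * k) "") := by
          refine List.mem_map.2 ⟨0, List.mem_range.2 ?_, by norm_num⟩
          rw [hm]; simp
        have := hEq _ ((PySem.Set.mem_ofList _ _).2 hmem) _ ((PySem.Set.mem_ofList _ _).2 hmem0)
        rw [this, h]; rfl
      · have hj2 : j = 2 * (j / 2) + 1 := by omega
        have hmem : ((x :: y :: rest).map (fun p => p.2)).getD j "" ∈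
            (List.range (((x :: y :: rest).map (fun p => p.2)).length / 2)).map
              (fun k => ((x :: y :: rest).map (fun p => p.2)).getD (2 * k + 1) "") := by
          refine List.mem_map.2 ⟨j / 2, List.mem_range.2 ?_, by rw [← hj2]⟩
          rw [hm]; simp at hj ⊢; omega
        have hmem1 : ((x :: y :: rest).map (fun p => p.2)).getD 1 "" ∈
            (List.range (((x :: y :: rest).map (fun p => p.2)).length / 2)).map
              (fun k => ((x :: y :: rest).map (fun p => p.2)).getD (2 * k + 1) "") := by
          refine List.mem_map.2 ⟨0, List.mem_range.2 ?_, by norm_num⟩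
          rw [hm]; simp
        have := hOd _ ((PySem.Set.mem_ofList _ _).2 hmem) _ ((PySem.Set.mem_ofList _ _).2 hmem1)
        rw [this, h]; simp [List.getD]
    -- combine the two components
    have h1c := hfst; have h2c := hsnd
    rw [pv_getD_map_fst _ _ hj] at h1c
    rw [pv_getD_map_snd _ _ hj] at h2c
    rcases Nat.mod_two_eq_zero_or_one j with h | h <;> rw [h] at h1c h2c ⊢ <;>
      norm_num at h1c h2c ⊢ <;> exact Prod.ext_iff.mpr ⟨h1c, h2c⟩

theorem pv_core_eq (tail : List (String × String)) : pvAcore tail = pvBcore tail := by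
  by_cases hn : tail.length < 2
  · -- short tails: the distinct-tool count is at most 1 on the A side, the length guard fires on the B side
    have hsub : (PySem.Set.ofList (tail.map (fun p => p.1))).length ≤ tail.length := by
      have h1 := (List.Nodup.subperm (PySem.Set.nodup_ofList (tail.map (fun p => p.1)))
        (fun z hz => (PySem.Set.mem_ofList _ _).1 hz)).length_le
      simpa using h1
    have hc : (PySem.Set.len (PySem.Set.ofList (tail.map (fun p => p.1))) ≠ 2) := by
      simp only [PySem.Set.len]; omega
    simp only [pvAcore, pvBcore]
    rw [if_pos hc, if_pos hn]
  · rcases tail with _ | ⟨x, _ | ⟨y, rest⟩⟩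
    · simp at hn
    · simp at hn
    · exact Bool.eq_iff_iff.mpr (by rw [pv_A_iff, pv_B_iff])

-- ===== VERDICT (by name: the statement is the Claim_ definition above) =====
theorem pingpong_tail_py_spec : Claim_equal_pingpong_tail_py := by
  intro history min_len _
  unfold Spec_pingpong_tail_py pingpong_tail_py pingpong_tail_py_alt
  split
  · rfl
  · exact pv_core_eq _
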